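-- pv_equiv track=rewrite | github.com/mjl1999/BlackJack | Day 11 Blackjack.py | convert_aces
-- ===== SOURCE A (Python) =====
-- def convert_aces(hand):
--     if sum(hand) > 21:
--         for index in range(len(hand)):
--             if hand[index] == 11:
--                 hand[index] = 1
--                 if sum(hand) <= 21:
--                     return hand
--                 else:
--                     continue
--         return hand
--     else:
--         return hand
-- ===== SOURCE B (Python) =====
-- def convert_aces(hand):
--     total = sum(hand)
--     if total <= 21:
--         return hand
--     needed = -((21 - total) // 10)  # ceil((total - 21) / 10): aces that must become 1
--     for i, v in enumerate(hand):
--         if needed == 0: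
--             break
--         if v == 11:
--             hand[i] = 1
--             needed -= 1
--     return hand
-- ===== Notes on version B (the rewrite author's own statement) =====
-- stated objective: alternative
-- what changed: B computes the number of aces to downgrade in closed form (ceil((sum-21)/10)) once and makes a single counting pass, instead of re-summing the whole hand after every conversion.
import Mathlib
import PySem

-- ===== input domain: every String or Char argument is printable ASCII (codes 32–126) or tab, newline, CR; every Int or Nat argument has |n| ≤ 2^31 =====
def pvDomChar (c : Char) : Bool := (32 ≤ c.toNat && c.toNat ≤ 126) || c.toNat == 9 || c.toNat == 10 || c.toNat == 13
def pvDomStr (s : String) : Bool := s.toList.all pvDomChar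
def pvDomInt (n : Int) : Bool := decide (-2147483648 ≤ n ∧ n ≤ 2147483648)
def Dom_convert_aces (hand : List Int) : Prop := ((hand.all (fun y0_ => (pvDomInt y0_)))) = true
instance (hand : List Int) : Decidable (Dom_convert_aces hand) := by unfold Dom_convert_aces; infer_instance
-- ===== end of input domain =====

-- B replaces A's re-sum-after-every-conversion loop by a closed-form count of aces to
-- downgrade plus one counting pass (objective: alternative decomposition; return-value
-- equivalence only — A mutates its argument in place, B's Python does the same mutation).

-- ===== PORT A =====
-- A's for-loop over range(len(hand)) with in-place mutation of hand[index]
def convertAcesLoopA (hand : List Int) (index : Nat) : List Int :=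
  if h : index < hand.length then
    if hand[index] = 11 then
      let hand' := hand.set index 1
      if hand'.sum ≤ 21 then hand' else convertAcesLoopA hand' (index + 1)
    else convertAcesLoopA hand (index + 1)
  else hand
termination_by hand.length - index
decreasing_by all_goals (try simp only [List.length_set]); omega

def convert_aces (hand : List Int) : List Int :=
  if hand.sum > 21 then convertAcesLoopA hand 0 else hand

-- ===== PORT B =====
-- B's single forward pass converting aces while the remaining-conversions counter is nonzero
def convertAcesLoopB : List Int → Int → List Int
  | [], _ => []
  | v :: vs, needed =>
    if needed = 0 then v :: vs
    else if v = 11 then 1 :: convertAcesLoopB vs (needed - 1)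
    else v :: convertAcesLoopB vs needed

def convert_aces_alt (hand : List Int) : List Int :=
  let total := hand.sum
  if total ≤ 21 then hand
  else convertAcesLoopB hand (-(PySem.Int.floordiv (21 - total) 10))

-- ===== PRECONDITION & SPEC =====
def Spec_convert_aces (hand : List Int) (out : List Int) : Prop := out = convert_aces_alt hand
instance (hand : List Int) (out : List Int) : Decidable (Spec_convert_aces hand out) := by unfold Spec_convert_aces; infer_instance

-- ===== CLAIM (what is proved, stated in full; the proofs are below) =====
def Claim_equal_convert_aces : Prop := ∀ (hand : List Int), Dom_convert_aces hand → Spec_convert_aces hand (convert_aces hand)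

-- ===== LEMMAS AND PROOFS =====

-- abbreviation used only in the proofs: the number of aces B downgrades
def acesNeeded (s : Int) : Int := -(PySem.Int.floordiv (21 - s) 10)

lemma acesNeeded_pos {s : Int} (h : 21 < s) : 1 ≤ acesNeeded s := by
  unfold acesNeeded
  have := (PySem.Int.floordiv_lt_iff_lt_mul (a := 21 - s) (b := 10) (q := 0) (by omega)).mpr (by omega)
  omega

lemma acesNeeded_one {s : Int} (h1 : 21 < s) (h2 : s ≤ 31) : acesNeeded s = 1 := by
  unfold acesNeeded
  have : (21 : Int) - s = -(s - 21) := by ring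
  rw [this]
  rw [PySem.Int.neg_floordiv_neg_eq_iff_of_pos (by omega)]
  omega

lemma acesNeeded_step {s : Int} (_h : 31 < s) : acesNeeded s - 1 = acesNeeded (s - 10) := by
  unfold acesNeeded
  have e : (21 : Int) - (s - 10) = 31 - s := by ring
  rw [e]
  have hq := (PySem.Int.floordiv_eq_iff_of_pos (a := 21 - s) (b := 10)
      (q := PySem.Int.floordiv (21 - s) 10) (by omega)).mp rfl
  have : PySem.Int.floordiv (31 - s) 10 = PySem.Int.floordiv (21 - s) 10 + 1 := by
    rw [PySem.Int.floordiv_eq_iff_of_pos (by omega)]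
    constructor <;> nlinarith [hq.1, hq.2]
  omega

lemma convertAcesLoopB_zero (xs : List Int) : convertAcesLoopB xs 0 = xs := by
  cases xs <;> simp [convertAcesLoopB]

lemma convertAcesLoopA_eq (suf pre : List Int) (h : 21 < (pre ++ suf).sum) :
    convertAcesLoopA (pre ++ suf) pre.length =
      pre ++ convertAcesLoopB suf (acesNeeded (pre ++ suf).sum) := by
  induction suf generalizing pre with
  | nil =>
    rw [convertAcesLoopA]
    simp [convertAcesLoopB]
  | cons v vs ih =>
    have hlen : pre.length < (pre ++ v :: vs).length := by simp
    have hget : (pre ++ v :: vs)[pre.length]'hlen = v := by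
      simp
    have hsum : (pre ++ v :: vs).sum = pre.sum + v + vs.sum := by
      simp; ring
    have hne := acesNeeded_pos h
    rw [convertAcesLoopA]
    rw [dif_pos hlen, hget]
    by_cases hv : v = 11
    · subst hv
      have hset : (pre ++ 11 :: vs).set pre.length 1 = pre ++ 1 :: vs := by
        simp
      rw [if_pos rfl]
      simp only [hset]
      have hsum' : (pre ++ 1 :: vs).sum = (pre ++ 11 :: vs).sum - 10 := by
        simp; ring
      by_cases hle : (pre ++ 1 :: vs).sum ≤ 21
      · rw [if_pos hle]
        have h1 : acesNeeded (pre ++ 11 :: vs).sum = 1 :=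
          acesNeeded_one h (by omega)
        rw [h1]
        simp [convertAcesLoopB, convertAcesLoopB_zero]
      · rw [if_neg hle]
        have h31 : 31 < (pre ++ 11 :: vs).sum := by omega
        have hrec : (pre ++ 1 :: vs) = (pre ++ [1]) ++ vs := by simp
        have hlen' : pre.length + 1 = (pre ++ [1]).length := by simp
        rw [hrec, hlen', ih (pre ++ [1]) (by rw [← hrec]; omega)]
        have hk : acesNeeded ((pre ++ [1]) ++ vs).sum
            = acesNeeded (pre ++ 11 :: vs).sum - 1 := by
          rw [← hrec, hsum', ← acesNeeded_step h31]
        rw [hk]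
        have hne0 : ¬ acesNeeded (pre.sum + (11 + vs.sum)) = 0 := by
          rw [show pre.sum + (11 + vs.sum) = (pre ++ 11 :: vs).sum by simp]; omega
        simp [convertAcesLoopB, hne0]
    · rw [if_neg hv]
      have hrec : (pre ++ v :: vs) = (pre ++ [v]) ++ vs := by simp
      have hlen' : pre.length + 1 = (pre ++ [v]).length := by simp
      conv_lhs => rw [hrec, hlen']
      rw [ih (pre ++ [v]) (by rw [← hrec]; omega)]
      rw [← hrec]
      have hne0 : ¬ acesNeeded (pre.sum + (v + vs.sum)) = 0 := by
        rw [show pre.sum + (v + vs.sum) = (pre ++ v :: vs).sum by simp]; omega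
      simp [convertAcesLoopB, hne0, hv]

-- ===== VERDICT (by name: the statement is the Claim_ definition above) =====
theorem convert_aces_spec : Claim_equal_convert_aces := by
  intro hand _
  unfold Spec_convert_aces convert_aces convert_aces_alt
  by_cases h : 21 < hand.sum
  · rw [if_pos h, if_neg (by omega)]
    have := convertAcesLoopA_eq hand [] (by simpa using h)
    simpa [acesNeeded] using this
  · rw [if_neg h, if_pos (by omega)]
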